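-- pv_equiv track=rewrite | github.com/marksruziboev/advent_of_code | d10.py | gir
-- ===== SOURCE A (Python) =====
-- def gir(f):
-- 	c = 0
-- 	p = 0
-- 	X =[]
-- 	for a in f:
-- 		if a.startswith('noop'):
-- 			X.append([c, p])
-- 			c += 1
-- 		elif a.startswith('add'):
-- 			X.append([c, p])
-- 			c += 1
-- 			X.append([c, p])
-- 			c += 1
-- 			p = (p + int(a.split(' ')[-1])) % 40
-- 	return(X)
-- ===== SOURCE B (Python) =====
-- def gir(f):
--     # flatten instructions into one X-delta per cycle: noop -> [0], add v -> [0, v]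
--     deltas = [d for a in f for d in (
--         [0] if a.startswith('noop')
--         else [0, int(a.split(' ')[-1])] if a.startswith('add')
--         else [])]
--     # the X register at cycle i is the prefix sum of deltas before i, mod 40
--     out, total = [], 0
--     for i, d in enumerate(deltas):
--         out.append([i, total % 40])
--         total += d
--     return out
-- ===== Notes on version B (the rewrite author's own statement) =====
-- stated objective: alternative
-- what changed: B replaces A's cycle-by-cycle register simulation (counter c, register p updated mod 40 inside the loop) by flattening the instructions into a per-cycle delta stream and emitting prefix sums taken mod 40 only at output time.
-- outside the precondition, e.g. on gir(['addx q']): A raises ValueError, B raises ValueError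
import Mathlib
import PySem

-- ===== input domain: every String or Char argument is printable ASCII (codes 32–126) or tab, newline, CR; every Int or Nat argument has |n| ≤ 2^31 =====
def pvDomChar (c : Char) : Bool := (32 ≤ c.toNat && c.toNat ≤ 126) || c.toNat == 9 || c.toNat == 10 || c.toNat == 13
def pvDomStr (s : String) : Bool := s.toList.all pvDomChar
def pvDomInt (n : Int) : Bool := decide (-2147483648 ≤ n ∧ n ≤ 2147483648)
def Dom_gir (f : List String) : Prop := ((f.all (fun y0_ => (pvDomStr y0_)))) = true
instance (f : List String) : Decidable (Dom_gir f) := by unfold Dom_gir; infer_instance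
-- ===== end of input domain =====

-- B replaces A's register simulation by a per-cycle delta stream followed by prefix sums
-- taken mod 40 at output time. Objective: alternative algorithm, same cost.

-- last token of a.split(' ') (split by ' ' on a string is always nonempty, so [-1] is total)
def girLastTok (a : String) : String := ((PySem.Str.split? a " ").getD []).getLastD ""

-- ===== PORT A =====
def girStep (st : Int × Int × List (List Int)) (a : String) : Int × Int × List (List Int) :=
  let (c, p, X) := st
  if PySem.Str.startswith a "noop" then
    (c + 1, p, X ++ [[c, p]])
  else if PySem.Str.startswith a "add" then
    (c + 2, PySem.Int.mod (p + (PySem.Int.ofStr? (girLastTok a)).getD 0) 40,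
      X ++ [[c, p], [c + 1, p]])
  else st

def gir (f : List String) : List (List Int) :=
  (f.foldl girStep (0, 0, [])).2.2

-- ===== PORT B =====
-- one X-delta per cycle: noop -> [0], add v -> [0, v], others -> []
def girChunk (a : String) : List Int :=
  if PySem.Str.startswith a "noop" then [0]
  else if PySem.Str.startswith a "add" then [0, (PySem.Int.ofStr? (girLastTok a)).getD 0]
  else []

def girSumStep (st : List (List Int) × Int) (id : Int × Int) : List (List Int) × Int :=
  (st.1 ++ [[id.1, PySem.Int.mod st.2 40]], st.2 + id.2)

def gir_alt (f : List String) : List (List Int) :=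
  let deltas := f.flatMap girChunk
  ((PySem.List.enumerate deltas).foldl girSumStep ([], 0)).1

-- ===== PRECONDITION & SPEC =====
-- Pre_ excludes inputs where int(a.split(' ')[-1]) raises ValueError on an 'add…' line
def Pre_gir (f : List String) : Prop :=
  ∀ a ∈ f, PySem.Str.startswith a "add" = true → ¬ PySem.Str.startswith a "noop" = true →
    (PySem.Int.ofStr? (girLastTok a)).isSome = true
instance (f : List String) : Decidable (Pre_gir f) := by unfold Pre_gir; infer_instance
def pvWitness_gir : List String := ["noop", "addx 3", "addx -5", "foo"]

def Spec_gir (f : List String) (out : List (List Int)) : Prop := out = gir_alt f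
instance (f : List String) (out : List (List Int)) : Decidable (Spec_gir f out) := by unfold Spec_gir; infer_instance

-- ===== CLAIM (what is proved, stated in full; the proofs are below) =====
def Claim_equal_gir : Prop := ∀ (f : List String), Dom_gir f → Pre_gir f → Spec_gir f (gir f)

-- ===== LEMMAS AND PROOFS =====

theorem girSum_append (ds es : List Int) (k : Int) (st : List (List Int) × Int) :
    (PySem.List.enumerate (ds ++ es) k).foldl girSumStep st =
      (PySem.List.enumerate es (k + ds.length)).foldl girSumStep
        ((PySem.List.enumerate ds k).foldl girSumStep st) := by
  rw [PySem.List.enumerate_append, List.foldl_append]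

theorem girMod_add (t v : Int) :
    PySem.Int.mod (PySem.Int.mod t 40 + v) 40 = PySem.Int.mod (t + v) 40 := by
  simp [PySem.Int.mod]

theorem gir_loop (f : List String) : ∀ (k t : Int) (out : List (List Int)),
    (f.foldl girStep (k, PySem.Int.mod t 40, out)).2.2 =
      ((PySem.List.enumerate (f.flatMap girChunk) k).foldl girSumStep (out, t)).1 := by
  induction f with
  | nil => intro k t out; simp
  | cons a f ih =>
    intro k t out
    simp only [List.foldl_cons, List.flatMap_cons, girStep, girChunk]
    by_cases h1 : PySem.Str.startswith a "noop" = true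
    · rw [if_pos h1, if_pos h1]
      rw [girSum_append]
      simpa [PySem.List.enumerate_cons, PySem.List.enumerate_nil, girSumStep]
        using ih (k + 1) t (out ++ [[k, PySem.Int.mod t 40]])
    · rw [if_neg h1, if_neg h1]
      by_cases h2 : PySem.Str.startswith a "add" = true
      · rw [if_pos h2, if_pos h2]
        rw [girSum_append]
        have hv := girMod_add t ((PySem.Int.ofStr? (girLastTok a)).getD 0)
        have := ih (k + 2) (t + (PySem.Int.ofStr? (girLastTok a)).getD 0)
          (out ++ [[k, PySem.Int.mod t 40], [k + 1, PySem.Int.mod t 40]])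
        rw [hv]
        simpa [PySem.List.enumerate_cons, PySem.List.enumerate_nil, girSumStep,
          add_assoc, add_comm, one_add_one_eq_two] using this
      · rw [if_neg h2, if_neg h2]
        simpa using ih k t out

-- ===== VERDICT (by name: the statement is the Claim_ definition above) =====
theorem gir_spec : Claim_equal_gir := by
  intro f _ _
  unfold Spec_gir gir gir_alt
  have := gir_loop f 0 0 []
  simpa using this
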